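-- pv_equiv track=rewrite | github.com/Real-Fruit-Snacks/mainsail | pybox/applets/tar.py | _expand_bundled
-- ===== SOURCE A (Python) =====
-- def _expand_bundled(args: list[str]) -> list[str]:
--     """Handle bundled flags: traditional 'cvfz' or dashed '-cvfz'."""
--     if not args or not args[0]:
--         return args
--     first = args[0]
--     if first.startswith("--") or first == "-":
--         return args
--     bundled = first[1:] if first.startswith("-") else first
--     if not bundled or not all(c in "cxtrvzjJfkpaoC" for c in bundled):
--         return args
--     value_taking = "fC"
--     need = sum(1 for c in bundled if c in value_taking)
--     if len(args) < 1 + need: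
--         return args
--     values = list(args[1:1 + need])
--     rest = args[1 + need:]
--     out: list[str] = []
--     for c in bundled:
--         out.append("-" + c)
--         if c in value_taking and values:
--             out.append(values.pop(0))
--     return out + rest
-- ===== SOURCE B (Python) =====
-- def _expand_bundled(args: list[str]) -> list[str]:
--     """Handle bundled flags: traditional 'cvfz' or dashed '-cvfz'."""
--     if not args or not args[0]:
--         return args
--     first = args[0]
--     if first.startswith("--") or first == "-":
--         return args
--     bundled = first[1:] if first.startswith("-") else first
--     if not bundled or not all(c in "cxtrvzjJfkpaoC" for c in bundled):
--         return args
--     # Split the cluster at its value-taking flags, then zip the resulting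
--     # segments of plain flags with the value-taking flags and their values.
--     seps = [c for c in bundled if c in "fC"]
--     need = len(seps)
--     if len(args) < 1 + need:
--         return args
--     parts = "".join("f" if c in "fC" else c for c in bundled).split("f")
--     out: list[str] = []
--     for part, sep, val in zip(parts, seps, args[1:1 + need]):
--         out += ["-" + c for c in part]
--         out += ["-" + sep, val]
--     out += ["-" + c for c in parts[-1]]
--     return out + args[1 + need:]
-- ===== Notes on version B (the rewrite author's own statement) =====
-- stated objective: alternative
-- what changed: Replaces A's single expansion loop that pops values from a mutable list by a staged split-and-zip plan: the cluster is split into segments at its value-taking flags (join/split), the segments are zipped with the value-taking flags and their values, and the output is assembled segment-wise.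
import Mathlib
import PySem

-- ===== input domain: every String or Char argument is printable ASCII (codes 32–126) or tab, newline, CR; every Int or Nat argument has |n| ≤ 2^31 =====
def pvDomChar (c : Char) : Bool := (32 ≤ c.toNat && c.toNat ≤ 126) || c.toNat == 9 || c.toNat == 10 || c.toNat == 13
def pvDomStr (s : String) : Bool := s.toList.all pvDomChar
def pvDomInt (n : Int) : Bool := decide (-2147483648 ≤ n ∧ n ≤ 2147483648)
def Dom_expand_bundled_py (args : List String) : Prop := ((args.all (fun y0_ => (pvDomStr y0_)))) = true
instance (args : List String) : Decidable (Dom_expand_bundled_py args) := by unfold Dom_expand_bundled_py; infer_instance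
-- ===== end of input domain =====

-- B replaces A's expansion loop (which pops values from a mutable list) by a staged
-- split-and-zip plan: split the cluster at its value-taking flags, zip the segments
-- with those flags and their values, and assemble the output segment-wise (alternative).

-- ===== PORT A =====
-- loop body of A's expansion loop ('out.append("-"+c); if c in value_taking and values: out.append(values.pop(0))')
def stepA (s : List String × List String) (c : Char) : List String × List String :=
  let out' := s.1 ++ [String.ofList ['-', c]]
  if "fC".toList.contains c ∧ s.2 ≠ [] then
    match s.2 with
    | [] => (out', ([] : List String))
    | v :: vs => (out' ++ [v], vs)
  else (out', s.2)
def expand_bundled_py (args : List String) : List String :=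
  match args with
  | [] => args
  | first :: _ =>
    if first = "" then args
    else if PySem.Str.startswith first "--" || first == "-" then args
    else
      let bundled : List Char :=
        if PySem.Str.startswith first "-" then PySem.List.slice first.toList (some 1) none
        else first.toList
      if bundled = [] ∨ ¬ bundled.all (fun c => "cxtrvzjJfkpaoC".toList.contains c) then args
      else
        let need : Int := bundled.foldl (fun n c => if "fC".toList.contains c then n + 1 else n) 0
        if (args.length : Int) < 1 + need then args
        else
          let values := PySem.List.slice args (some 1) (some (1 + need))
          let rest := PySem.List.slice args (some (1 + need)) none
          let st := bundled.foldl stepA (([] : List String), values)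
          st.1 ++ rest

-- ===== PORT B =====
-- '-' + c
def flagTok (c : Char) : String := String.ofList ['-', c]

-- hand port of Python's str.split with the one-character separator "f"
-- (exact for a one-char separator: "".split("f") = [""], separators at the
-- ends and adjacent separators give empty segments)
def splitF : List Char → List (List Char)
  | [] => [[]]
  | c :: cs =>
    match splitF cs with
    | [] => [[]]            -- unreachable: splitF never returns []
    | p :: ps => if c = 'f' then [] :: p :: ps else (c :: p) :: ps

def expand_bundled_py_alt (args : List String) : List String :=
  match args with
  | [] => args
  | first :: _ =>
    if first = "" then args
    else if PySem.Str.startswith first "--" || first == "-" then args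
    else
      let bundled : List Char :=
        if PySem.Str.startswith first "-" then PySem.List.slice first.toList (some 1) none
        else first.toList
      if bundled = [] ∨ ¬ bundled.all (fun c => "cxtrvzjJfkpaoC".toList.contains c) then args
      else
        let seps := bundled.filter (fun c => "fC".toList.contains c)
        let need := seps.length
        if args.length < 1 + need then args
        else
          let parts := splitF (bundled.map (fun c => if "fC".toList.contains c then 'f' else c))
          let vals := PySem.List.slice args (some 1) (some (1 + (need : Int)))
          let out := (parts.zip (seps.zip vals)).foldl
            (fun out t => out ++ t.1.map flagTok ++ [flagTok t.2.1, t.2.2]) []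
          -- parts[-1]: str.split never returns an empty list
          let out2 := out ++ (parts.getLastD []).map flagTok
          out2 ++ PySem.List.slice args (some (1 + (need : Int))) none

-- ===== PRECONDITION & SPEC =====
def Spec_expand_bundled_py (args : List String) (out : List String) : Prop := out = expand_bundled_py_alt args
instance (args : List String) (out : List String) : Decidable (Spec_expand_bundled_py args out) := by unfold Spec_expand_bundled_py; infer_instance

-- ===== CLAIM (what is proved, stated in full; the proofs are below) =====
def Claim_equal_expand_bundled_py : Prop := ∀ (args : List String), Dom_expand_bundled_py args → Spec_expand_bundled_py args (expand_bundled_py args)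

-- ===== LEMMAS AND PROOFS =====

-- the common expansion result, parametrised by the available values
def expOut : List Char → List String → List String
  | [], _ => []
  | c :: cs, vals =>
    if "fC".toList.contains c then
      match vals with
      | [] => flagTok c :: expOut cs []
      | v :: vs => flagTok c :: v :: expOut cs vs
    else flagTok c :: expOut cs vals

def cntVT (bundled : List Char) : Nat := bundled.countP (fun c => "fC".toList.contains c)

theorem foldlA_eq (bundled : List Char) (out vals : List String) :
    (bundled.foldl stepA (out, vals)).1 = out ++ expOut bundled vals := by
  induction bundled generalizing out vals with
  | nil => simp [expOut]
  | cons c cs ih =>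
    simp only [List.foldl_cons]
    by_cases hc : c = 'f' ∨ c = 'C'
    · match vals with
      | [] =>
        have hstep : stepA (out, ([] : List String)) c
            = (out ++ [String.ofList ['-', c]], ([] : List String)) := by
          simp [stepA]
        rw [hstep, ih]
        rcases hc with h | h <;> simp [expOut, flagTok, h]
      | v :: vs =>
        have hstep : stepA (out, v :: vs) c
            = (out ++ [String.ofList ['-', c]] ++ [v], vs) := by
          rcases hc with h | h <;> simp [stepA, h]
        rw [hstep, ih]
        rcases hc with h | h <;> simp [expOut, flagTok, h]
    · have hstep : stepA (out, vals) c = (out ++ [String.ofList ['-', c]], vals) := by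
        simp [stepA, hc]
      rw [hstep, ih]
      simp [expOut, flagTok, hc]

theorem need_eq (bundled : List Char) :
    bundled.foldl (fun (n : Int) c => if "fC".toList.contains c then n + 1 else n) 0
      = (cntVT bundled : Int) := by
  rw [PySem.List.foldl_if_add_one]
  unfold cntVT
  rw [zero_add]

theorem splitF_ne_nil (xs : List Char) : splitF xs ≠ [] := by
  cases xs with
  | nil => simp [splitF]
  | cons c cs =>
    cases h : splitF cs with
    | nil => simp [splitF, h]
    | cons p ps =>
      simp only [splitF, h]
      split <;> simp

theorem splitF_cons_eq {xs : List Char} {p : List Char} {ps : List (List Char)} (c : Char)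
    (h : splitF xs = p :: ps) :
    splitF (c :: xs) = if c = 'f' then [] :: p :: ps else (c :: p) :: ps := by
  simp [splitF, h]

theorem splitF_no_f {xs : List Char} (h : 'f' ∉ xs) : splitF xs = [xs] := by
  induction xs with
  | nil => simp [splitF]
  | cons c cs ih =>
    have hc : c ≠ 'f' := fun hcf => h (hcf ▸ List.mem_cons_self)
    have hcs : 'f' ∉ cs := fun hm => h (List.mem_cons_of_mem _ hm)
    rw [splitF_cons_eq c (ih hcs), if_neg hc]

theorem splitF_length (xs : List Char) : (splitF xs).length = xs.count 'f' + 1 := by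
  induction xs with
  | nil => simp [splitF]
  | cons c cs ih =>
    obtain ⟨p, ps, h⟩ := List.exists_cons_of_ne_nil (splitF_ne_nil cs)
    rw [splitF_cons_eq c h]
    rw [h] at ih
    by_cases hc : c = 'f'
    · subst hc
      simp only [if_pos rfl, List.length_cons]
      simp [List.count_cons] at *
      omega
    · rw [if_neg hc]
      simp only [List.length_cons]
      simp [List.count_cons, hc, Ne.symm hc] at *
      omega

theorem expOut_cons_pos {c : Char} {cs : List Char} {v : String} {vs : List String}
    (hc : "fC".toList.contains c = true) :
    expOut (c :: cs) (v :: vs) = flagTok c :: v :: expOut cs vs := by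
  rcases (by simpa using hc : c = 'f' ∨ c = 'C') with h | h <;> simp [expOut, h]

theorem expOut_cons_neg {c : Char} {cs : List Char} {vals : List String}
    (hc : ¬ "fC".toList.contains c = true) :
    expOut (c :: cs) vals = flagTok c :: expOut cs vals := by
  have h1 : ¬ (c = 'f' ∨ c = 'C') := by simpa using hc
  cases vals <;> simp [expOut, h1]

theorem foldlZ (l : List (List Char × (Char × String))) (init : List String) :
    l.foldl (fun out t => out ++ t.1.map flagTok ++ [flagTok t.2.1, t.2.2]) init
      = init ++ l.flatMap (fun t => t.1.map flagTok ++ [flagTok t.2.1, t.2.2]) := by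
  induction l generalizing init with
  | nil => simp
  | cons t ts ih =>
    rw [List.foldl_cons, ih]
    simp [List.flatMap_cons, List.append_assoc]

-- the heart of the equivalence: split-and-zip assembly = A's scan
theorem zip_expand (cs : List Char) (vals : List String)
    (h : vals.length = (cs.filter (fun c => "fC".toList.contains c)).length) :
    ((splitF (cs.map (fun c => if "fC".toList.contains c then 'f' else c))).zip
        ((cs.filter (fun c => "fC".toList.contains c)).zip vals)).flatMap
          (fun t => t.1.map flagTok ++ [flagTok t.2.1, t.2.2])
      ++ ((splitF (cs.map (fun c => if "fC".toList.contains c then 'f' else c))).getLastD []).map flagTok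
      = expOut cs vals := by
  induction cs generalizing vals with
  | nil =>
    have : vals = [] := by simpa using h
    subst this
    simp [splitF, expOut]
  | cons c cs ih =>
    obtain ⟨p, ps, hsp⟩ := List.exists_cons_of_ne_nil
      (splitF_ne_nil (cs.map (fun c => if "fC".toList.contains c then 'f' else c)))
    by_cases hc : ("fC".toList.contains c) = true
    · -- value-taking flag: the split starts a fresh (empty) segment
      have hmap : (c :: cs).map (fun c => if "fC".toList.contains c then 'f' else c)
          = 'f' :: cs.map (fun c => if "fC".toList.contains c then 'f' else c) := by
        rw [List.map_cons, if_pos hc]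
      have hfil : (c :: cs).filter (fun c => "fC".toList.contains c)
          = c :: cs.filter (fun c => "fC".toList.contains c) := by
        rw [List.filter_cons_of_pos hc]
      match vals with
      | [] => rw [hfil] at h; simp at h
      | v :: vs =>
        rw [hfil] at h
        have hlen : vs.length = (cs.filter (fun c => "fC".toList.contains c)).length := by
          simpa using h
        rw [hmap, splitF_cons_eq 'f' hsp, if_pos rfl, hfil]
        have ihe := ih vs hlen
        rw [hsp] at ihe
        simp only [List.getLastD_cons] at ihe
        simp only [List.zip_cons_cons, List.flatMap_cons, List.map_nil, List.nil_append,
          List.getLastD_cons, List.append_assoc] at *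
        rw [ihe, expOut_cons_pos hc]
        simp
    · -- plain flag: it is prepended to the first segment
      have hcf : c ≠ 'f' := by
        intro hcf; subst hcf; simp at hc
      have hmap : (c :: cs).map (fun c => if "fC".toList.contains c then 'f' else c)
          = c :: cs.map (fun c => if "fC".toList.contains c then 'f' else c) := by
        rw [List.map_cons, if_neg hc]
      have hfil : (c :: cs).filter (fun c => "fC".toList.contains c)
          = cs.filter (fun c => "fC".toList.contains c) := by
        rw [List.filter_cons_of_neg (by simpa using hc)]
      rw [hmap, splitF_cons_eq c hsp, if_neg hcf, hfil]
      by_cases hf : cs.filter (fun c => "fC".toList.contains c) = []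
      · -- no value-taking flag left: a single segment
        have hv : vals = [] := by
          rw [hfil, hf] at h
          simpa using h
        subst hv
        have hnof : 'f' ∉ cs.map (fun c => if "fC".toList.contains c then 'f' else c) := by
          intro hm
          obtain ⟨x, hx, hxe⟩ := List.mem_map.mp hm
          by_cases hxc : ("fC".toList.contains x) = true
          · have : x ∈ cs.filter (fun c => "fC".toList.contains c) :=
              List.mem_filter.mpr ⟨hx, hxc⟩
            rw [hf] at this; simp at this
          · rw [if_neg hxc] at hxe
            subst hxe
            simp at hxc
        have hone := splitF_no_f hnof
        rw [hone] at hsp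
        injection hsp with hp hps
        subst hp
        subst hps
        have ihe := ih [] (by rw [hf]; rfl)
        rw [hone, hf] at ihe
        simp only [List.zip_nil_right, List.zip_nil_left, List.flatMap_nil, List.nil_append,
          List.getLastD_cons, List.getLastD_nil] at ihe
        simp only [hf, List.zip_nil_left, List.zip_nil_right, List.flatMap_nil, List.nil_append,
          List.getLastD_cons, List.getLastD_nil, List.map_cons]
        rw [expOut_cons_neg hc, ← ihe]
      · -- a value-taking flag remains: the split has ≥ 2 parts, its head segment grows by c
        obtain ⟨s, ss, hfe⟩ := List.exists_cons_of_ne_nil hf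
        have hlen : vals.length = (cs.filter (fun c => "fC".toList.contains c)).length := by
          rw [hfil] at h; exact h
        have hvne : vals ≠ [] := by
          intro hv; rw [hv, hfe] at hlen; simp at hlen
        obtain ⟨v, vs, hve⟩ := List.exists_cons_of_ne_nil hvne
        subst hve
        have hcount : (cs.map (fun c => if "fC".toList.contains c then 'f' else c)).count 'f'
            = (cs.filter (fun c => "fC".toList.contains c)).length := by
          rw [List.count_eq_countP, List.countP_map, ← List.countP_eq_length_filter]
          apply List.countP_congr
          intro a _
          by_cases haf : a = 'f'
          · subst haf; simp
          · by_cases haC : a = 'C'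
            · subst haC; simp
            · have hcon : ("fC".toList.contains a) = false := by simp [haf, haC]
              simp [Function.comp, hcon, haf]
        have hlen2 : (splitF (cs.map (fun c => if "fC".toList.contains c then 'f' else c))).length ≥ 2 := by
          rw [splitF_length, hcount, hfe]
          simp
        have hpsne : ps ≠ [] := by
          intro hpse
          rw [hsp, hpse] at hlen2
          simp at hlen2
        obtain ⟨q, qs, hqe⟩ := List.exists_cons_of_ne_nil hpsne
        subst hqe
        have ihe := ih (v :: vs) hlen
        rw [hsp] at ihe
        simp only [hfe, List.zip_cons_cons, List.flatMap_cons, List.getLastD_cons,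
          List.map_cons, List.cons_append, List.append_assoc] at ihe ⊢
        rw [expOut_cons_neg hc, ← ihe]

theorem core_eq (args : List String) :
    expand_bundled_py args = expand_bundled_py_alt args := by
  match args with
  | [] => rfl
  | first :: tail =>
    simp only [expand_bundled_py, expand_bundled_py_alt]
    by_cases h1 : first = ""
    · rw [if_pos h1, if_pos h1]
    · rw [if_neg h1, if_neg h1]
      by_cases h2 : (PySem.Str.startswith first "--" || first == "-") = true
      · rw [if_pos h2, if_pos h2]
      · rw [if_neg h2, if_neg h2]
        set bundled : List Char :=
          (if PySem.Str.startswith first "-" = true then PySem.List.slice first.toList (some 1) none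
           else first.toList) with hb
        by_cases h3 : bundled = [] ∨ ¬ bundled.all (fun c => "cxtrvzjJfkpaoC".toList.contains c) = true
        · rw [if_pos h3, if_pos h3]
        · rw [if_neg h3, if_neg h3]
          rw [need_eq]
          have hn : (bundled.filter (fun c => "fC".toList.contains c)).length = cntVT bundled := by
            rw [cntVT, List.countP_eq_length_filter]
          rw [hn]
          by_cases h4 : ((first :: tail).length : Int) < 1 + (cntVT bundled : Int)
          · have h4n : (first :: tail).length < 1 + cntVT bundled := by exact_mod_cast h4
            rw [if_pos h4, if_pos h4n]
          · have h4n : ¬ (first :: tail).length < 1 + cntVT bundled := by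
              intro hx; exact h4 (by exact_mod_cast hx)
            rw [if_neg h4, if_neg h4n]
            rw [foldlA_eq, foldlZ]
            have hslice : PySem.List.slice (first :: tail) (some 1) (some (1 + (cntVT bundled : Int)))
                = tail.take (cntVT bundled) := by
              have := PySem.List.slice_natCast_add (first :: tail) 1 (cntVT bundled)
              simpa using this
            have hvlen : (tail.take (cntVT bundled)).length
                = (bundled.filter (fun c => "fC".toList.contains c)).length := by
              rw [hn, List.length_take]
              have : cntVT bundled ≤ tail.length := by
                simp at h4n
                omega
              omega
            have hz := zip_expand bundled (tail.take (cntVT bundled)) hvlen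
            rw [hslice, ← hz]
            simp [List.append_assoc]

-- ===== VERDICT (by name: the statement is the Claim_ definition above) =====
theorem expand_bundled_py_spec : Claim_equal_expand_bundled_py := by
  intro args _
  exact core_eq args
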